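-- pv_equiv track=rewrite | github.com/guaneec/aoc | python/aoc/2019/16.py | ffft
-- ===== SOURCE A (Python) =====
-- from itertools import cycle, accumulate, chain
--
-- def ffft(a):
--     n = len(a)
--     sums = list(reversed(list(accumulate(reversed(a)))))
--     rets = sums.copy()
--     for m, sign in zip(range(2, n+1), cycle([-1,-1,+1,+1])) :
--         for i in range(1, n // m + 1):
--             rets[i-1] += sign * sums[i*m-1]
--     return [abs(x) % 10 for x in rets]
-- ===== SOURCE B (Python) =====
-- def ffft(a):
--     n = len(a)
--     base = [0, 1, 0, -1]
--     out = []
--     for i in range(1, n + 1):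
--         s = 0
--         for j in range(n):
--             s += a[j] * base[((j + 1) // i) % 4]
--         out.append(abs(s) % 10)
--     return out
-- ===== Notes on version B (the rewrite author's own statement) =====
-- stated objective: simpler
-- what changed: B computes each output digit directly as the dot product of the input with the repeating FFT base pattern (coefficient base[((j+1)//i) % 4]), replacing A's reversed-accumulate suffix-sum table and sparse signed block updates over rets.
import Mathlib
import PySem

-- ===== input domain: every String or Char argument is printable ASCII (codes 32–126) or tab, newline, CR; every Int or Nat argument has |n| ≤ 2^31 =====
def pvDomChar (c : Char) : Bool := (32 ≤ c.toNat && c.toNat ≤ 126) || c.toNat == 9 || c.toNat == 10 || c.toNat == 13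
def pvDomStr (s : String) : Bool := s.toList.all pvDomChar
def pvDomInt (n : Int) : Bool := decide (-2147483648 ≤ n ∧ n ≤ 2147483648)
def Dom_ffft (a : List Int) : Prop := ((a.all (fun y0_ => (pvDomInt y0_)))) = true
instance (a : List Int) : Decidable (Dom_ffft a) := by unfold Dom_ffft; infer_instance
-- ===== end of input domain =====

-- B replaces A's suffix-sum/accumulate trick by the direct per-digit pattern dot product (simpler; not faster).

-- ===== PORT A =====
-- itertools.accumulate: running sums (helper for port A)
def pvAccum (s : Int) : List Int → List Int
  | [] => []
  | x :: xs => (s + x) :: pvAccum (s + x) xs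

def ffft (a : List Int) : List Int :=
  let n : Int := a.length
  let sums : List Int := (pvAccum 0 a.reverse).reverse
  -- rets = sums.copy(); zip(range(2,n+1), cycle([-1,-1,1,1])): sign of m is [-1,-1,1,1][(m-2)%4]
  let rets : List Int :=
    (PySem.List.pyRange 2 (n + 1) 1).foldl (fun rets m =>
      let sign : Int := PySem.List.pyGetD [-1, -1, 1, 1] (PySem.Int.mod (m - 2) 4) 0
      (PySem.List.pyRange 1 (PySem.Int.floordiv n m + 1) 1).foldl (fun rets i =>
        PySem.List.pySetD rets (i - 1)
          (PySem.List.pyGetD rets (i - 1) 0 + sign * PySem.List.pyGetD sums (i * m - 1) 0)) rets) sums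
  rets.map (fun x => PySem.Int.mod |x| 10)

-- ===== PORT B =====
def ffft_alt (a : List Int) : List Int :=
  let n : Int := a.length
  let base : List Int := [0, 1, 0, -1]
  (PySem.List.pyRange 1 (n + 1) 1).foldl (fun out i =>
    let s : Int := (PySem.List.pyRange 0 n 1).foldl (fun s j =>
      s + PySem.List.pyGetD a j 0 *
          PySem.List.pyGetD base (PySem.Int.mod (PySem.Int.floordiv (j + 1) i) 4) 0) 0
    out ++ [PySem.Int.mod |s| 10]) []

-- ===== PRECONDITION & SPEC =====
def Spec_ffft (a : List Int) (out : List Int) : Prop := out = ffft_alt a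
instance (a : List Int) (out : List Int) : Decidable (Spec_ffft a out) := by unfold Spec_ffft; infer_instance

-- ===== CLAIM (what is proved, stated in full; the proofs are below) =====
def Claim_equal_ffft : Prop := ∀ (a : List Int), Dom_ffft a → Spec_ffft a (ffft a)


-- ===== LEMMAS AND PROOFS =====

-- sign of outer-loop index m (m ≥ 1): +1,-1,-1,+1 repeating, sgn 1 = 1
def pvSgn (m : Nat) : Int := [1, 1, -1, -1].getD (m % 4) 0

-- partial sums of pvSgn, as a function of q % 4 (B's base pattern [0,1,0,-1])
def pvS (q : Nat) : Int := [0, 1, 0, -1].getD (q % 4) 0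

-- one in-place additive update at position p
def pvStep (g : Nat → Int) (r : List Int) (p : Nat) : List Int := r.set p (r.getD p 0 + g p)

theorem pvAccum_append (l1 l2 : List Int) (s : Int) :
    pvAccum s (l1 ++ l2) = pvAccum s l1 ++ pvAccum (s + l1.sum) l2 := by
  induction l1 generalizing s with
  | nil => simp [pvAccum]
  | cons x xs ih => simp [pvAccum, ih, add_assoc]

theorem sums_eq (a : List Int) :
    (pvAccum 0 a.reverse).reverse = (List.range a.length).map (fun k => (a.drop k).sum) := by
  induction a with
  | nil => simp [pvAccum]
  | cons x xs ih =>
    have h : (x :: xs).reverse = xs.reverse ++ [x] := by simp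
    rw [h, pvAccum_append]
    simp only [pvAccum, List.reverse_append, List.reverse_cons, List.reverse_nil,
      List.nil_append, List.cons_append, ih]
    simp only [List.length_cons]
    rw [List.range_succ_eq_map]
    simp [List.sum_reverse]
    ring

theorem len_foldl_step (P : List Nat) (g : Nat → Int) (r : List Int) :
    (P.foldl (pvStep g) r).length = r.length := by
  induction P generalizing r with
  | nil => rfl
  | cons p P ih => simp [ih, pvStep]

theorem getD_foldl_step (P : List Nat) (hnd : P.Nodup) (g : Nat → Int) (r : List Int)
    (k : Nat) (hk : k < r.length) :
    (P.foldl (pvStep g) r).getD k 0 = r.getD k 0 + if k ∈ P then g k else 0 := by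
  induction P generalizing r with
  | nil => simp
  | cons p P ih =>
    simp only [List.foldl_cons]
    have hlen : (pvStep g r p).length = r.length := by simp [pvStep]
    rw [ih (List.nodup_cons.mp hnd).2 _ (hlen ▸ hk)]
    by_cases hkp : k = p
    · subst hkp
      have hnmem : k ∉ P := (List.nodup_cons.mp hnd).1
      simp [pvStep, List.getD, hk, hnmem]
    · have hne : (pvStep g r p)[k]? = r[k]? := by
        simp [pvStep, List.getElem?_set_ne (Ne.symm hkp)]
      simp [List.getD, hne, hkp]

theorem getD_outer (ts : List Nat) (G : Nat → Nat → Int) (C : Nat → Nat) (r : List Int)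
    (k : Nat) (hk : k < r.length) :
    ((ts.foldl (fun r t => (List.range (C t)).foldl (pvStep (G t)) r) r).getD k 0)
      = r.getD k 0 + (ts.map (fun t => if k < C t then G t k else 0)).sum := by
  induction ts generalizing r with
  | nil => simp
  | cons t ts ih =>
    simp only [List.foldl_cons, List.map_cons, List.sum_cons]
    have hlen := len_foldl_step (List.range (C t)) (G t) r
    rw [ih _ (hlen ▸ hk)]
    rw [getD_foldl_step _ (List.nodup_range) _ _ k hk]
    simp [List.mem_range]
    ring

theorem len_outer (ts : List Nat) (G : Nat → Nat → Int) (C : Nat → Nat) (r : List Int) :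
    (ts.foldl (fun r t => (List.range (C t)).foldl (pvStep (G t)) r) r).length = r.length := by
  induction ts generalizing r with
  | nil => rfl
  | cons t ts ih => simp [ih, len_foldl_step]

theorem sum_drop (a : List Int) (t : Nat) :
    (a.drop t).sum = ∑ j ∈ Finset.Ico t a.length, a.getD j 0 := by
  induction a generalizing t with
  | nil => simp
  | cons x xs ih =>
    cases t with
    | zero =>
      simp only [List.drop_zero, List.sum_cons, List.length_cons]
      rw [Finset.sum_Ico_eq_sum_range]
      simp only [Nat.sub_zero, Nat.zero_add]
      rw [Finset.sum_range_succ']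
      simp only [List.getD_cons_succ, List.getD_cons_zero]
      have h0 : xs.sum = ∑ j ∈ Finset.Ico 0 xs.length, xs.getD j 0 := by
        simpa using ih 0
      rw [Finset.range_eq_Ico, ← h0]
      ring
    | succ s =>
      simp only [List.drop_succ_cons, List.length_cons]
      rw [ih s, Finset.sum_Ico_eq_sum_range, Finset.sum_Ico_eq_sum_range]
      simp only [Nat.succ_sub_succ]
      apply Finset.sum_congr rfl
      intro i _
      have : s + 1 + i = (s + i) + 1 := by omega
      rw [this, List.getD_cons_succ]

theorem pvS_succ (q : Nat) : pvS (q + 1) = pvS q + pvSgn (q + 1) := by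
  have h4 : q % 4 = 0 ∨ q % 4 = 1 ∨ q % 4 = 2 ∨ q % 4 = 3 := by omega
  have h1 : (q + 1) % 4 = (q % 4 + 1) % 4 := by omega
  rcases h4 with h | h | h | h <;> simp [pvS, pvSgn, h1, h]

theorem sum_sgn (q : Nat) : (∑ m ∈ Finset.range q, pvSgn (m + 1)) = pvS q := by
  induction q with
  | zero => simp [pvS, pvSgn]
  | succ q ih => rw [Finset.sum_range_succ, ih, pvS_succ]

theorem pvMod4 (q : Nat) : PySem.Int.mod (q : Int) 4 = ((q % 4 : Nat) : Int) := by
  exact_mod_cast PySem.Int.mod_natCast q 4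

theorem pvCastIdx (k t : Nat) :
    (1 + (k : Int)) * (2 + (t : Int)) - 1 = (((k + 1) * (t + 2) - 1 : Nat) : Int) := by
  have h : 1 ≤ (k + 1) * (t + 2) := Nat.one_le_iff_ne_zero.mpr (by positivity)
  rw [Nat.cast_sub h]
  push_cast
  ring

theorem pvSgn_shift (t : Nat) : ([-1, -1, 1, 1] : List Int).getD (t % 4) 0 = pvSgn (t + 2) := by
  have h4 : t % 4 = 0 ∨ t % 4 = 1 ∨ t % 4 = 2 ∨ t % 4 = 3 := by omega
  have h1 : (t + 2) % 4 = (t % 4 + 2) % 4 := by omega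
  rcases h4 with h | h | h | h <;> simp [pvSgn, h1, h]

-- A's fold pipeline, re-indexed over Nat
theorem ffft_eq_loop (a : List Int) :
    ffft a = ((List.range (a.length - 1)).foldl
        (fun r t => (List.range (a.length / (t + 2))).foldl
            (pvStep (fun k => pvSgn (t + 2) *
              ((pvAccum 0 a.reverse).reverse.getD ((k + 1) * (t + 2) - 1) 0))) r)
        ((pvAccum 0 a.reverse).reverse)).map (fun x => PySem.Int.mod |x| 10) := by
  unfold ffft
  simp only [PySem.List.pyRange_one, List.foldl_map]
  rw [show ((a.length : Int) + 1 - 2).toNat = a.length - 1 by omega]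
  congr 1
  apply List.foldl_ext
  intro r t _
  have hm : (2 + (t : Int)) = ((t + 2 : Nat) : Int) := by push_cast; ring
  rw [hm, PySem.Int.floordiv_natCast, add_sub_cancel_right, Int.toNat_natCast]
  apply List.foldl_ext
  intro r' k _
  rw [show (1 + (k : Int) - 1) = (k : Int) by ring,
      show (((t + 2 : Nat) : Int) - 2) = (t : Int) by push_cast; ring]
  rw [show (1 + (k : Int)) * ((t + 2 : Nat) : Int) - 1 = (((k + 1) * (t + 2) - 1 : Nat) : Int) by
        rw [← pvCastIdx k t]; push_cast; ring]
  simp only [pvMod4, PySem.List.pyGetD_natCast, PySem.List.pySetD_natCast]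
  rw [pvSgn_shift]
  rfl

-- B in closed form
theorem ffft_alt_eq (a : List Int) :
    ffft_alt a = (List.range a.length).map (fun k =>
      PySem.Int.mod |∑ j ∈ Finset.range a.length, a.getD j 0 * pvS ((j + 1) / (k + 1))| 10) := by
  unfold ffft_alt
  simp only [PySem.List.pyRange_one, List.foldl_map]
  rw [show ((a.length : Int) + 1 - 1).toNat = a.length by omega,
      show ((a.length : Int) - 0).toNat = a.length by omega]
  rw [PySem.List.foldl_append_singleton_eq_map, List.nil_append]
  congr 1
  funext k
  congr 1
  congr 1
  rw [PySem.List.foldl_add, zero_add]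
  show ((List.range a.length).map _).sum = _
  rw [show ∀ f : Nat → Int, ((List.range a.length).map f).sum = ∑ j ∈ Finset.range a.length, f j
        from fun f => rfl]
  apply Finset.sum_congr rfl
  intro j hj
  rw [show ((0 : Int) + (j : Int)) = (j : Int) by ring]
  rw [show ((j : Int) + 1) = ((j + 1 : Nat) : Int) by push_cast; ring,
      show (1 + (k : Int)) = ((k + 1 : Nat) : Int) by push_cast; ring,
      PySem.Int.floordiv_natCast, pvMod4]
  simp only [PySem.List.pyGetD_natCast]
  rfl

theorem pvTrunc (q n : Nat) (g : Nat → Int) (h : q ≤ n) :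
    (∑ m ∈ Finset.range n, if m < q then g m else 0) = ∑ m ∈ Finset.range q, g m := by
  rw [Finset.sum_ite, Finset.sum_const_zero, add_zero]
  apply Finset.sum_congr _ (fun x _ => rfl)
  ext m; simp [Finset.mem_filter]; omega

-- the crux: A's suffix-sum/block value at index k equals B's pattern dot product
theorem key (a : List Int) (k : Nat) (hk : k < a.length) :
    (a.drop k).sum + ∑ t ∈ Finset.range (a.length - 1),
        (if k < a.length / (t + 2) then pvSgn (t + 2) * (a.drop ((k + 1) * (t + 2) - 1)).sum else 0)
      = ∑ j ∈ Finset.range a.length, a.getD j 0 * pvS ((j + 1) / (k + 1)) := by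
  set n := a.length with hn
  have hA : (a.drop k).sum + ∑ t ∈ Finset.range (n - 1),
        (if k < n / (t + 2) then pvSgn (t + 2) * (a.drop ((k + 1) * (t + 2) - 1)).sum else 0)
      = ∑ m ∈ Finset.range n,
          (if (k + 1) * (m + 1) ≤ n then pvSgn (m + 1) * (a.drop ((k + 1) * (m + 1) - 1)).sum
           else 0) := by
    rw [show Finset.range n = Finset.range (n - 1 + 1) by congr 1; omega,
        Finset.sum_range_succ']
    have h0 : (if (k + 1) * (0 + 1) ≤ n then pvSgn (0 + 1) * (a.drop ((k + 1) * (0 + 1) - 1)).sum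
        else 0) = (a.drop k).sum := by
      rw [if_pos (by omega)]
      norm_num [pvSgn]
    rw [h0, add_comm]
    congr 1
    apply Finset.sum_congr rfl
    intro t _
    congr 1
    rw [Nat.lt_iff_add_one_le, Nat.le_div_iff_mul_le (by omega : 0 < t + 2)]
  rw [hA]
  have hF : ∀ m, (if (k + 1) * (m + 1) ≤ n then pvSgn (m + 1) * (a.drop ((k + 1) * (m + 1) - 1)).sum else 0)
      = ∑ j ∈ Finset.range n, (if (k + 1) * (m + 1) ≤ j + 1 then pvSgn (m + 1) * a.getD j 0 else 0) := by
    intro m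
    have hP1 : 1 ≤ (k + 1) * (m + 1) := Nat.one_le_iff_ne_zero.mpr (by positivity)
    by_cases hC : (k + 1) * (m + 1) ≤ n
    · rw [if_pos hC, sum_drop, ← hn, Finset.mul_sum]
      rw [Finset.sum_ite, Finset.sum_const_zero, add_zero]
      have hfil : Finset.filter (fun j => (k + 1) * (m + 1) ≤ j + 1) (Finset.range n)
          = Finset.Ico ((k + 1) * (m + 1) - 1) n := by
        ext j
        simp only [Finset.mem_filter, Finset.mem_range, Finset.mem_Ico]
        omega
      rw [hfil]
    · rw [if_neg hC]
      symm
      apply Finset.sum_eq_zero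
      intro j hj
      rw [if_neg]
      rw [Finset.mem_range] at hj
      omega
  calc ∑ m ∈ Finset.range n,
          (if (k + 1) * (m + 1) ≤ n then pvSgn (m + 1) * (a.drop ((k + 1) * (m + 1) - 1)).sum else 0)
      = ∑ m ∈ Finset.range n, ∑ j ∈ Finset.range n,
          (if (k + 1) * (m + 1) ≤ j + 1 then pvSgn (m + 1) * a.getD j 0 else 0) :=
        Finset.sum_congr rfl (fun m _ => hF m)
    _ = ∑ j ∈ Finset.range n, ∑ m ∈ Finset.range n,
          (if (k + 1) * (m + 1) ≤ j + 1 then pvSgn (m + 1) * a.getD j 0 else 0) := Finset.sum_comm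
    _ = ∑ j ∈ Finset.range n, a.getD j 0 * pvS ((j + 1) / (k + 1)) := by
        apply Finset.sum_congr rfl
        intro j hj
        rw [Finset.mem_range] at hj
        have hq : (j + 1) / (k + 1) ≤ n := le_trans (Nat.div_le_self _ _) (by omega)
        have hcond : ∀ m, ((k + 1) * (m + 1) ≤ j + 1) = (m < (j + 1) / (k + 1)) := by
          intro m
          apply propext
          rw [Nat.lt_iff_add_one_le, Nat.le_div_iff_mul_le (by omega : 0 < k + 1),
              Nat.mul_comm]
        calc ∑ m ∈ Finset.range n,
                (if (k + 1) * (m + 1) ≤ j + 1 then pvSgn (m + 1) * a.getD j 0 else 0)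
            = ∑ m ∈ Finset.range n,
                (if m < (j + 1) / (k + 1) then pvSgn (m + 1) * a.getD j 0 else 0) := by
              apply Finset.sum_congr rfl
              intro m _
              simp only [hcond]
          _ = ∑ m ∈ Finset.range ((j + 1) / (k + 1)), pvSgn (m + 1) * a.getD j 0 :=
              pvTrunc _ _ _ hq
          _ = (∑ m ∈ Finset.range ((j + 1) / (k + 1)), pvSgn (m + 1)) * a.getD j 0 :=
              (Finset.sum_mul _ _ _).symm
          _ = a.getD j 0 * pvS ((j + 1) / (k + 1)) := by rw [sum_sgn, mul_comm]

theorem ffft_eq_alt (a : List Int) : ffft a = ffft_alt a := by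
  rw [ffft_eq_loop, ffft_alt_eq]
  have hlen : ((pvAccum 0 a.reverse).reverse).length = a.length := by
    rw [sums_eq]; simp
  apply List.ext_getElem
  · simp [len_outer, hlen]
  · intro k h1 h2
    have hkn : k < a.length := by simpa using h2
    have hkf : k < ((List.range (a.length - 1)).foldl
        (fun r t => (List.range (a.length / (t + 2))).foldl
          (pvStep (fun k => pvSgn (t + 2) *
            ((pvAccum 0 a.reverse).reverse.getD ((k + 1) * (t + 2) - 1) 0))) r)
        ((pvAccum 0 a.reverse).reverse)).length := by
      rw [len_outer, hlen]; exact hkn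
    simp only [List.getElem_map, List.getElem_range]
    congr 1
    congr 1
    rw [← List.getD_eq_getElem _ 0 hkf]
    rw [getD_outer _ _ _ _ k (hlen ▸ hkn)]
    have hsum : ∀ f : Nat → Int, ((List.range (a.length - 1)).map f).sum
        = ∑ t ∈ Finset.range (a.length - 1), f t := fun f => rfl
    rw [hsum]
    have hgetD : ∀ j, j < a.length → ((pvAccum 0 a.reverse).reverse).getD j 0 = (a.drop j).sum := by
      intro j hj
      rw [sums_eq, PySem.List.getD_map_range _ _ _ _ hj]
    rw [hgetD k hkn]
    have hcongr : ∑ t ∈ Finset.range (a.length - 1),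
          (if k < a.length / (t + 2)
           then pvSgn (t + 2) * ((pvAccum 0 a.reverse).reverse.getD ((k + 1) * (t + 2) - 1) 0)
           else 0)
        = ∑ t ∈ Finset.range (a.length - 1),
          (if k < a.length / (t + 2)
           then pvSgn (t + 2) * (a.drop ((k + 1) * (t + 2) - 1)).sum else 0) := by
      apply Finset.sum_congr rfl
      intro t _
      by_cases hC : k < a.length / (t + 2)
      · rw [if_pos hC, if_pos hC]
        have hle : (k + 1) * (t + 2) ≤ a.length := by
          rw [Nat.lt_iff_add_one_le, Nat.le_div_iff_mul_le (by omega : 0 < t + 2)] at hC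
          exact hC
        have hidx : (k + 1) * (t + 2) - 1 < a.length := by
          have h1 : 1 ≤ (k + 1) * (t + 2) := Nat.one_le_iff_ne_zero.mpr (by positivity)
          omega
        rw [hgetD _ hidx]
      · rw [if_neg hC, if_neg hC]
    rw [hcongr]
    exact key a k hkn


-- ===== VERDICT (by name: the statement is the Claim_ definition above) =====
theorem ffft_spec : Claim_equal_ffft := by
  intro a _
  unfold Spec_ffft
  exact ffft_eq_alt a
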